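-- pv_equiv track=rewrite | github.com/clearmedium/python-demo | Paired Comparison Exercise.py | is_paired
-- ===== SOURCE A (Python) =====
-- def is_paired(input_string):
--     bracketsr = []
--     bracesr = []
--     parensr = []
-- #THIS IS ON THE RIGHT TRACK: fix the fact that it does not account for nested pairs and instead look for a way to do comparison by iterating through the string with all the non {}[]() characters removed.
--     for char in input_string:
--         if char == "[" or char == "]":
--             bracketsr.append(char)
--         if char == "{" or char == "}":
--             bracesr.append(char)
--         if char == "(" or char == ")":
--             parensr.append(char)
--         else:
--             continue
--
--     if all(item == "[" for item in bracketsr[0::2]) and all(item == "]" for item in bracketsr[1::2]) and all(item == "{" for item in bracesr[0::2]) and all(item == "}" for item in bracesr[1::2]) and all(item == "(" for item in parensr[0::2]) and all(item == ")" for item in parensr[1::2]):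
--         return True
--     else:
--         return False
-- ===== SOURCE B (Python) =====
-- def is_paired(input_string):
--     brackets = braces = parens = 0
--     for ch in input_string:
--         if ch == "[" or ch == "]":
--             if ch != ("[" if brackets % 2 == 0 else "]"):
--                 return False
--             brackets += 1
--         elif ch == "{" or ch == "}":
--             if ch != ("{" if braces % 2 == 0 else "}"):
--                 return False
--             braces += 1
--         elif ch == "(" or ch == ")":
--             if ch != ("(" if parens % 2 == 0 else ")"):
--                 return False
--             parens += 1
--     return True
-- ===== Notes on version B (the rewrite author's own statement) =====
-- stated objective: simpler
-- what changed: Single pass with one parity counter per bracket type (even count expects the opener, odd the closer) and early return, replacing A's phase of building three lists followed by six slice-and-all checks.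
import Mathlib
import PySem

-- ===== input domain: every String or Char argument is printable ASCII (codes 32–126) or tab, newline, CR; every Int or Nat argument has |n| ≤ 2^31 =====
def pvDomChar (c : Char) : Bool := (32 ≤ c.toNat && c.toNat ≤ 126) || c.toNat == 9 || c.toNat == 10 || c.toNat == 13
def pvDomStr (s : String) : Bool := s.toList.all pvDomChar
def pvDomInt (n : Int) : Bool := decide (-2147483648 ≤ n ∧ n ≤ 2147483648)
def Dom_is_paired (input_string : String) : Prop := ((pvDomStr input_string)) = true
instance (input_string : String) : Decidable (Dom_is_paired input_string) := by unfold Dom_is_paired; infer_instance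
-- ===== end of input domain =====

-- B replaces A's collect-then-slice check by a single pass with one parity counter per
-- bracket type (simpler; early return, no stored lists).

-- ===== PORT A =====
-- the for-loop: three independent membership tests appending to three lists
-- (the trailing 'else: continue' in the Python is a no-op)
def pvALoop : List Char → List Char × List Char × List Char → List Char × List Char × List Char
  | [], st => st
  | c :: rest, (br, bc, pr) =>
    let br' := if c == '[' || c == ']' then br ++ [c] else br
    let bc' := if c == '{' || c == '}' then bc ++ [c] else bc
    let pr' := if c == '(' || c == ')' then pr ++ [c] else pr
    pvALoop rest (br', bc', pr')

-- all(item == ch for item in l[start::2]); step 2 ≠ 0 so slice? is always `some`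
-- and .getD [] is exact
def pvAllSlice (l : List Char) (start : Int) (ch : Char) : Bool :=
  ((PySem.List.slice? l (some start) none 2).getD []).all (· == ch)

def is_paired (input_string : String) : Bool :=
  let st := pvALoop input_string.toList ([], [], [])
  let bracketsr := st.1
  let bracesr := st.2.1
  let parensr := st.2.2
  if pvAllSlice bracketsr 0 '[' && pvAllSlice bracketsr 1 ']' &&
     pvAllSlice bracesr 0 '{' && pvAllSlice bracesr 1 '}' &&
     pvAllSlice parensr 0 '(' && pvAllSlice parensr 1 ')' then true else false

-- ===== PORT B =====
-- one pass, three parity counters; even count expects the opener, odd the closer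
def pvBLoop : List Char → Nat → Nat → Nat → Bool
  | [], _, _, _ => true
  | c :: rest, brackets, braces, parens =>
    if c == '[' || c == ']' then
      if c != (if brackets % 2 == 0 then '[' else ']') then false
      else pvBLoop rest (brackets + 1) braces parens
    else if c == '{' || c == '}' then
      if c != (if braces % 2 == 0 then '{' else '}') then false
      else pvBLoop rest brackets (braces + 1) parens
    else if c == '(' || c == ')' then
      if c != (if parens % 2 == 0 then '(' else ')') then false
      else pvBLoop rest brackets braces (parens + 1)
    else pvBLoop rest brackets braces parens

def is_paired_alt (input_string : String) : Bool :=
  pvBLoop input_string.toList 0 0 0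

-- ===== PRECONDITION & SPEC =====
def Spec_is_paired (input_string : String) (out : Bool) : Prop := out = is_paired_alt input_string
instance (input_string : String) (out : Bool) : Decidable (Spec_is_paired input_string out) := by unfold Spec_is_paired; infer_instance

-- ===== CLAIM (what is proved, stated in full; the proofs are below) =====
def Claim_equal_is_paired : Prop := ∀ (input_string : String), Dom_is_paired input_string → Spec_is_paired input_string (is_paired input_string)

-- ===== LEMMAS AND PROOFS =====

-- elements at even / odd positions
def pvEvens {α : Type} : List α → List α
  | [] => []
  | [a] => [a]
  | a :: _ :: t => a :: pvEvens t

def pvOdds {α : Type} : List α → List α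
  | [] => []
  | [_] => []
  | _ :: b :: t => b :: pvOdds t

theorem pvEvensOdds_cons {α : Type} (l : List α) :
    (∀ x : α, pvEvens (x :: l) = x :: pvOdds l) ∧ (∀ x : α, pvOdds (x :: l) = pvEvens l) := by
  induction l with
  | nil => simp [pvEvens, pvOdds]
  | cons y t ih =>
    constructor
    · intro x
      show x :: pvEvens t = x :: pvOdds (y :: t)
      rw [ih.2 y]
    · intro x
      show y :: pvOdds t = pvEvens (y :: t)
      rw [ih.1 y]

theorem pv_fm_evens {α : Type} (l : List α) :
    (List.range ((l.length + 1) / 2)).filterMap (fun k => l[2*k]?) = pvEvens l := by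
  induction l using pvEvens.induct with
  | case1 => simp [pvEvens]
  | case2 a => simp [pvEvens]
  | case3 a b t ih =>
    have hlen : ((a :: b :: t).length + 1) / 2 = (t.length + 1) / 2 + 1 := by
      simp; omega
    rw [hlen, List.range_succ_eq_map, List.filterMap_cons, List.filterMap_map]
    simp only [pvEvens]
    have : (List.filterMap ((fun k => (a :: b :: t)[2*k]?) ∘ (· + 1)) (List.range ((t.length + 1) / 2)))
        = List.filterMap (fun k => t[2*k]?) (List.range ((t.length + 1) / 2)) := by
      apply List.filterMap_congr
      intro x hx
      show (a :: b :: t)[2*(x+1)]? = t[2*x]?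
      have h2 : 2*(x+1) = (2*x) + 1 + 1 := by omega
      rw [h2]
      simp
    rw [this, ih]
    rfl

theorem pv_fm_odds {α : Type} (l : List α) :
    (List.range (l.length / 2)).filterMap (fun k => l[2*k+1]?) = pvOdds l := by
  induction l using pvOdds.induct with
  | case1 => simp [pvOdds]
  | case2 a => simp [pvOdds]
  | case3 a b t ih =>
    have hlen : (a :: b :: t).length / 2 = t.length / 2 + 1 := by
      simp; omega
    rw [hlen, List.range_succ_eq_map, List.filterMap_cons, List.filterMap_map]
    simp only [pvOdds]
    have : (List.filterMap ((fun k => (a :: b :: t)[2*k+1]?) ∘ (· + 1)) (List.range (t.length / 2)))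
        = List.filterMap (fun k => t[2*k+1]?) (List.range (t.length / 2)) := by
      apply List.filterMap_congr
      intro x hx
      show (a :: b :: t)[2*(x+1)+1]? = t[2*x+1]?
      have h2 : 2*(x+1)+1 = (2*x+1) + 1 + 1 := by omega
      rw [h2]
      simp
    rw [this, ih]
    rfl

theorem pv_slice_evens {α : Type} (l : List α) :
    PySem.List.slice? l (some 0) none 2 = some (pvEvens l) := by
  rw [← pv_fm_evens]
  simp [PySem.List.slice?, PySem.List.sliceIndices]
  have h1 : (if 0 < l.length then (((l.length:Int) + 2 - 1) / 2).toNat else 0) = (l.length + 1)/2 := by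
    split_ifs with h
    · have he : ((l.length:Int) + 2 - 1) = ((l.length + 1 : Nat) : Int) := by push_cast; ring
      rw [he, show ((2:Int) = ((2:Nat):Int)) from rfl, ← Int.natCast_div, Int.toNat_natCast]
    · omega
  rw [h1]
  apply List.filterMap_congr
  intro x hx
  congr 1

theorem pv_slice_odds {α : Type} (l : List α) :
    PySem.List.slice? l (some 1) none 2 = some (pvOdds l) := by
  rw [← pv_fm_odds]
  simp [PySem.List.slice?, PySem.List.sliceIndices]
  by_cases hl : l.length = 0
  · simp [hl]
  · have hmin : min 1 (l.length:Int) = 1 := by omega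
    rw [hmin]
    have h1 : (if 1 < l.length then (((l.length:Int) - 1 + 2 - 1) / 2).toNat else 0) = l.length/2 := by
      split_ifs with h
      · have he : ((l.length:Int) - 1 + 2 - 1) = ((l.length : Nat) : Int) := by push_cast; ring
        rw [he, show ((2:Int) = ((2:Nat):Int)) from rfl, ← Int.natCast_div, Int.toNat_natCast]
      · omega
    rw [h1]
    apply List.filterMap_congr
    intro x hx
    congr 1
    omega

-- the accumulated lists of A's loop are accumulator ++ filter
theorem pvALoop_eq (l : List Char) : ∀ (br bc pr : List Char),
    pvALoop l (br, bc, pr) =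
      (br ++ l.filter (fun c => c == '[' || c == ']'),
       bc ++ l.filter (fun c => c == '{' || c == '}'),
       pr ++ l.filter (fun c => c == '(' || c == ')')) := by
  induction l with
  | nil => intro br bc pr; simp [pvALoop]
  | cons c rest ih =>
    intro br bc pr
    show pvALoop rest _ = _
    rw [ih]
    by_cases h1 : (c == '[' || c == ']') = true <;>
      by_cases h2 : (c == '{' || c == '}') = true <;>
        by_cases h3 : (c == '(' || c == ')') = true <;>
          simp [h1, h2, h3, List.filter_cons]

-- alternation check of one filtered stream with a running parity counter
def pvChk (o c : Char) : List Char → Nat → Bool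
  | [], _ => true
  | x :: t, n => (x == (if n % 2 == 0 then o else c)) && pvChk o c t (n + 1)

theorem pvBLoop_eq (l : List Char) : ∀ (b r p : Nat),
    pvBLoop l b r p =
      (pvChk '[' ']' (l.filter (fun c => c == '[' || c == ']')) b &&
       pvChk '{' '}' (l.filter (fun c => c == '{' || c == '}')) r &&
       pvChk '(' ')' (l.filter (fun c => c == '(' || c == ')')) p) := by
  induction l with
  | nil => intro b r p; simp [pvBLoop, pvChk]
  | cons c rest ih =>
    intro b r p
    by_cases e1 : c = '['
    · subst e1
      simp only [pvBLoop, List.filter_cons]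
      norm_num [pvChk]
      by_cases hb : b % 2 = 0 <;> simp [hb, ih]
    by_cases e2 : c = ']'
    · subst e2
      simp only [pvBLoop, List.filter_cons]
      norm_num [pvChk]
      by_cases hb : b % 2 = 0 <;> simp [hb, ih]
    by_cases e3 : c = '{'
    · subst e3
      simp only [pvBLoop, List.filter_cons]
      norm_num [pvChk]
      by_cases hr : r % 2 = 0 <;> simp [hr, ih]
    by_cases e4 : c = '}'
    · subst e4
      simp only [pvBLoop, List.filter_cons]
      norm_num [pvChk]
      by_cases hr : r % 2 = 0 <;> simp [hr, ih]
    by_cases e5 : c = '('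
    · subst e5
      simp only [pvBLoop, List.filter_cons]
      norm_num [pvChk]
      by_cases hp : p % 2 = 0 <;> simp [hp, ih]
    by_cases e6 : c = ')'
    · subst e6
      simp only [pvBLoop, List.filter_cons]
      norm_num [pvChk]
      by_cases hp : p % 2 = 0 <;> simp [hp, ih]
    simp only [pvBLoop, List.filter_cons]
    simp [e1, e2, e3, e4, e5, e6, ih]

theorem pv_if_bool (b : Bool) : (if b = true then true else false) = b := by
  cases b <;> rfl

-- pvChk of a stream equals the two slice checks, with parity-swapped expectations
theorem pvChk_eq (o c : Char) (l : List Char) : ∀ n : Nat,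
    pvChk o c l n =
      (if n % 2 = 0 then (pvEvens l).all (· == o) && (pvOdds l).all (· == c)
       else (pvEvens l).all (· == c) && (pvOdds l).all (· == o)) := by
  induction l with
  | nil => intro n; simp [pvChk, pvEvens, pvOdds]
  | cons x t ih =>
    intro n
    rw [show pvChk o c (x :: t) n = ((x == (if n % 2 == 0 then o else c)) && pvChk o c t (n + 1)) from rfl,
        ih (n + 1), (pvEvensOdds_cons t).1 x, (pvEvensOdds_cons t).2 x]
    by_cases hn : n % 2 = 0
    · have hn1 : ¬ (n + 1) % 2 = 0 := by omega
      simp [hn, hn1, Bool.and_comm, Bool.and_assoc, Bool.and_left_comm]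
    · have hn1 : (n + 1) % 2 = 0 := by omega
      simp [hn, hn1, Bool.and_comm, Bool.and_assoc, Bool.and_left_comm]

-- ===== VERDICT (by name: the statement is the Claim_ definition above) =====
theorem is_paired_spec : Claim_equal_is_paired := by
  intro s _
  unfold Spec_is_paired is_paired is_paired_alt
  rw [pvALoop_eq, pvBLoop_eq]
  simp only [pvAllSlice, pv_slice_evens, pv_slice_odds, Option.getD_some, List.nil_append]
  rw [pvChk_eq, pvChk_eq, pvChk_eq]
  simp only [if_true, Bool.and_assoc]
  exact pv_if_bool _
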